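-- pv_equiv track=rewrite | github.com/ThamemAnsari/Ocr | main.py | get_user_type
-- ===== SOURCE A (Python) =====
-- from typing import Optional, List, Dict
--
-- def get_user_type(groups: List[Dict]) -> Optional[str]:
--     """Determine user type from groups"""
--     group_names = [g.get("name", "") for g in groups]
--
--     if "ECR Student" in group_names:
--         return "ecr_student"
--     elif "ICM Student" in group_names:
--         return "icm_student"
--     elif "IATC Admin" in group_names:
--         return "admin"
--
--     return None
-- ===== SOURCE B (Python) =====
-- from typing import Optional, List, Dict
--
-- _PRIORITY = {
--     "ECR Student": (0, "ecr_student"),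
--     "ICM Student": (1, "icm_student"),
--     "IATC Admin": (2, "admin"),
-- }
--
-- def get_user_type(groups: List[Dict]) -> Optional[str]:
--     """Determine user type from groups (single table-driven pass keeping best rank)"""
--     best = None
--     for g in groups:
--         cand = _PRIORITY.get(g.get("name", ""))
--         if cand is not None and (best is None or cand[0] < best[0]):
--             best = cand
--     return best[1] if best is not None else None
-- ===== Notes on version B (the rewrite author's own statement) =====
-- stated objective: alternative
-- what changed: Replaced building a name list and three sequential membership scans by one table-driven pass that keeps the candidate with the smallest priority rank.
import Mathlib
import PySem

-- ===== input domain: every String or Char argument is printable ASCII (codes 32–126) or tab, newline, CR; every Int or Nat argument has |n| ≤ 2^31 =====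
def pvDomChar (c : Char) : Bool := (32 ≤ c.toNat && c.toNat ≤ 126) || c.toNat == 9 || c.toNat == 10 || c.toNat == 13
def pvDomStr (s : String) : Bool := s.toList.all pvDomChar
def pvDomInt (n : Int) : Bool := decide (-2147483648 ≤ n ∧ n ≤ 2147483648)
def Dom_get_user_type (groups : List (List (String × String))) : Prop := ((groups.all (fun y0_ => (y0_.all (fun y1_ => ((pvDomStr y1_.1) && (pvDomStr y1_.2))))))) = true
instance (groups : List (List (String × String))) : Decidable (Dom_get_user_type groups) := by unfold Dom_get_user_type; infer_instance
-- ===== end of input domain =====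

-- B replaces the three sequential membership scans over a built name list by one
-- table-driven pass keeping the candidate with the smallest priority rank (alternative decomposition).


-- ===== PORT A =====
def get_user_type (groups : List (List (String × String))) : Option String :=
  let group_names := groups.map (fun g => (PySem.Dict.mk g).getD "name" "")
  if "ECR Student" ∈ group_names then some "ecr_student"
  else if "ICM Student" ∈ group_names then some "icm_student"
  else if "IATC Admin" ∈ group_names then some "admin"
  else none

-- ===== PORT B =====
-- the _PRIORITY table
def pvPriority : PySem.Dict String (Int × String) :=
  PySem.Dict.mk [("ECR Student", (0, "ecr_student")),
                 ("ICM Student", (1, "icm_student")),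
                 ("IATC Admin", (2, "admin"))]

-- body of B's loop: update the running best match
def pvStep (best : Option (Int × String)) (g : List (String × String)) : Option (Int × String) :=
  match pvPriority.get? ((PySem.Dict.mk g).getD "name" "") with
  | none => best
  | some cand =>
    match best with
    | none => some cand
    | some b => if cand.1 < b.1 then some cand else best

def get_user_type_alt (groups : List (List (String × String))) : Option String :=
  match groups.foldl pvStep none with
  | some b => some b.2
  | none => none

-- ===== PRECONDITION & SPEC =====
def Spec_get_user_type (groups : List (List (String × String))) (out : Option String) : Prop := out = get_user_type_alt groups
instance (groups : List (List (String × String))) (out : Option String) : Decidable (Spec_get_user_type groups out) := by unfold Spec_get_user_type; infer_instance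

-- ===== CLAIM (what is proved, stated in full; the proofs are below) =====
def Claim_equal_get_user_type : Prop := ∀ (groups : List (List (String × String))), Dom_get_user_type groups → Spec_get_user_type groups (get_user_type groups)

-- ===== LEMMAS AND PROOFS =====

-- the symmetric-shape merge pvStep performs on the accumulator
def pvMerge (a b : Option (Int × String)) : Option (Int × String) :=
  match a, b with
  | none, b => b
  | some a', none => some a'
  | some a', some b' => if b'.1 < a'.1 then some b' else some a'

def pvCand (g : List (String × String)) : Option (Int × String) :=
  pvPriority.get? ((PySem.Dict.mk g).getD "name" "")

lemma pvStep_eq_merge (best : Option (Int × String)) (g : List (String × String)) :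
    pvStep best g = pvMerge best (pvCand g) := by
  unfold pvStep pvMerge pvCand
  cases pvPriority.get? ((PySem.Dict.mk g).getD "name" "") <;> cases best <;> rfl

lemma pvMerge_assoc (a b c : Option (Int × String)) :
    pvMerge (pvMerge a b) c = pvMerge a (pvMerge b c) := by
  rcases a with _ | ⟨x, sx⟩ <;> rcases b with _ | ⟨y, sy⟩ <;> rcases c with _ | ⟨z, sz⟩ <;>
    (repeat' (first | rfl | (exfalso; omega) | split_ifs | simp only [pvMerge]))

lemma pvFoldl_merge (l : List (List (String × String))) (a : Option (Int × String)) :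
    l.foldl pvStep a = pvMerge a (l.foldl pvStep none) := by
  induction l generalizing a with
  | nil => cases a <;> rfl
  | cons g t ih =>
    simp only [List.foldl_cons, pvStep_eq_merge]
    rw [ih, ih (pvMerge none (pvCand g)), ← pvMerge_assoc]
    rfl

lemma pvFoldl_char (l : List (List (String × String))) :
    l.foldl pvStep none =
      (if "ECR Student" ∈ l.map (fun g => (PySem.Dict.mk g).getD "name" "") then some ((0 : Int), "ecr_student")
       else if "ICM Student" ∈ l.map (fun g => (PySem.Dict.mk g).getD "name" "") then some ((1 : Int), "icm_student")
       else if "IATC Admin" ∈ l.map (fun g => (PySem.Dict.mk g).getD "name" "") then some ((2 : Int), "admin")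
       else none) := by
  induction l with
  | nil => rfl
  | cons g t ih =>
    rw [List.foldl_cons, pvFoldl_merge, ih, pvStep_eq_merge]
    simp only [List.map_cons, List.mem_cons, pvMerge]
    simp only [pvCand, pvPriority, PySem.Dict.get?_mk_cons]
    split_ifs <;> simp_all <;> aesop

-- ===== VERDICT (by name: the statement is the Claim_ definition above) =====
theorem get_user_type_spec : Claim_equal_get_user_type := by
  intro groups _
  unfold Spec_get_user_type get_user_type get_user_type_alt
  rw [pvFoldl_char]
  by_cases hE : "ECR Student" ∈ groups.map (fun g => (PySem.Dict.mk g).getD "name" "") <;>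
  by_cases hI : "ICM Student" ∈ groups.map (fun g => (PySem.Dict.mk g).getD "name" "") <;>
  by_cases hA : "IATC Admin" ∈ groups.map (fun g => (PySem.Dict.mk g).getD "name" "") <;>
    simp [hE, hI, hA]
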